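-- pv_equiv track=rewrite | github.com/ionutms/KiCAD_Symbol_Generator | scripts/utilities/symbol_utils.py | get_all_properties
-- ===== SOURCE A (Python) =====
-- def get_all_properties(
--         component_data_list: list[dict[str, str]],
-- ) -> list[str]:
--     """Get all properties from the component data in a consistent order.
--
--     Args:
--         component_data_list (List[Dict[str, str]]): List of component data.
--
--     Returns:
--         list[str]:
--             List of all unique property names with priority properties first,
--             then remaining properties in alphabetical order.
--
--     """
--     all_properties = set()
--
--     # Priority properties that should always come first
--     priority_properties = [
--         "Reference",
--         "Value",
--         "Footprint",
--         "Datasheet",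
--     ]
--
--     # Collect all unique properties
--     for component in component_data_list:
--         all_properties.update(component.keys())
--
--     # Create final sorted list:
--     # 1. Start with priority properties (if they exist in the data)
--     result = [prop for prop in priority_properties if prop in all_properties]
--
--     # 2. Add remaining properties in alphabetical order
--     remaining_props = sorted(
--         prop for prop in all_properties if prop not in priority_properties)
--     result.extend(remaining_props)
--
--     return result
-- ===== SOURCE B (Python) =====
-- def get_all_properties(
--         component_data_list: list[dict[str, str]],
-- ) -> list[str]:
--     """Get all unique property names: priority ones first (in priority
--     order), then the rest alphabetically — one sorted() with a composite
--     (rank, name) key instead of filter + sort + extend."""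
--     priority_properties = [
--         "Reference",
--         "Value",
--         "Footprint",
--         "Datasheet",
--     ]
--     rank = {name: index for index, name in enumerate(priority_properties)}
--
--     all_properties = set()
--     for component in component_data_list:
--         all_properties.update(component.keys())
--
--     return sorted(
--         all_properties,
--         key=lambda name: (rank.get(name, len(priority_properties)), name),
--     )
-- ===== Notes on version B (the rewrite author's own statement) =====
-- stated objective: simpler
-- what changed: Replaced the two-phase tail (filter priority list by membership, sort the remaining names, extend) by one sorted() over the whole union with a composite (rank, name) key, ranks taken from a dict built once from the priority list.
import Mathlib
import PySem

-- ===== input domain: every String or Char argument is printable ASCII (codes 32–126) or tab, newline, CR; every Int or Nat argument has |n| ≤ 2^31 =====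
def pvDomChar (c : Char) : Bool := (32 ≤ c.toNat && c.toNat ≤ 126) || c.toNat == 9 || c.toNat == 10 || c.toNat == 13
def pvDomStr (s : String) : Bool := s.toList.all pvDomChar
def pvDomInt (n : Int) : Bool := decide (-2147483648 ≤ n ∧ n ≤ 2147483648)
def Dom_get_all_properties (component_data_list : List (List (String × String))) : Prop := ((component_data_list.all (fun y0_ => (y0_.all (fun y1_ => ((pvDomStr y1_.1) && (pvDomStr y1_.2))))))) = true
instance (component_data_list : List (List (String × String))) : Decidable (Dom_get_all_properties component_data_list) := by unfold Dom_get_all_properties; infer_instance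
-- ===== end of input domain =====

-- B replaces A's two-phase tail (filter the priority list, sort the rest, extend)
-- by one sort of the whole union under a composite (rank, name) key (objective: simpler).

-- the priority list, identical in both Pythons
def pvPriority : List String := ["Reference", "Value", "Footprint", "Datasheet"]

-- the union-of-keys loop, textually identical in both Pythons
-- (component.keys() on the association list = the first components)
def pvCollectProps (component_data_list : List (List (String × String))) : PySem.Set String :=
  component_data_list.foldl
    (fun all_properties component => PySem.Set.update all_properties (component.map Prod.fst))
    PySem.Set.empty

-- ===== PORT A =====
def get_all_properties (component_data_list : List (List (String × String))) : List String :=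
  let all_properties := pvCollectProps component_data_list
  let result := pvPriority.filter (fun prop => PySem.Set.contains all_properties prop)
  let remaining_props :=
    PySem.List.sorted (all_properties.filter (fun prop => !(pvPriority.contains prop)))
      (fun x => x) false
  result ++ remaining_props

-- ===== PORT B =====
def get_all_properties_alt (component_data_list : List (List (String × String))) : List String :=
  let rank : PySem.Dict String Int :=
    (PySem.List.enumerate pvPriority).foldl
      (fun d p => PySem.Dict.insert d p.2 p.1) PySem.Dict.empty
  let all_properties := pvCollectProps component_data_list
  PySem.List.sorted2 all_properties
    (fun name => PySem.Dict.getD rank name ((pvPriority.length : Int)))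
    (fun name => name) false

-- ===== PRECONDITION & SPEC =====
def Spec_get_all_properties (component_data_list : List (List (String × String))) (out : List String) : Prop := out = get_all_properties_alt component_data_list
instance (component_data_list : List (List (String × String))) (out : List String) : Decidable (Spec_get_all_properties component_data_list out) := by unfold Spec_get_all_properties; infer_instance

-- ===== CLAIM (what is proved, stated in full; the proofs are below) =====
def Claim_equal_get_all_properties : Prop := ∀ (component_data_list : List (List (String × String))), Dom_get_all_properties component_data_list → Spec_get_all_properties component_data_list (get_all_properties component_data_list)

-- ===== LEMMAS AND PROOFS =====

-- the rank dictionary of port B, written out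
def pvRank : PySem.Dict String Int :=
  (((PySem.Dict.empty.insert "Reference" 0).insert "Value" 1).insert "Footprint" 2).insert "Datasheet" 3

lemma pvRank_eq :
    (PySem.List.enumerate pvPriority).foldl
      (fun d p => PySem.Dict.insert d p.2 p.1) PySem.Dict.empty = pvRank := by
  rfl

-- B's composite key, with the String component made lexicographic
def pvKey (n : String) : Lex (Int × String) := toLex (PySem.Dict.getD pvRank n 4, n)

lemma pvRank_not_mem (n : String) (h : n ∉ pvPriority) :
    PySem.Dict.getD pvRank n 4 = 4 := by
  simp only [pvPriority, List.mem_cons, List.not_mem_nil, or_false, not_or] at h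
  obtain ⟨h1, h2, h3, h4⟩ := h
  simp [pvRank, PySem.Dict.getD_insert_of_ne _ _ _ h1,
    PySem.Dict.getD_insert_of_ne _ _ _ h2, PySem.Dict.getD_insert_of_ne _ _ _ h3,
    PySem.Dict.getD_insert_of_ne _ _ _ h4, PySem.Dict.getD_empty]

lemma pvCollect_nodup (component_data_list : List (List (String × String))) :
    (pvCollectProps component_data_list).Nodup := by
  unfold pvCollectProps
  suffices h : ∀ (l : List (List (String × String))) (s : PySem.Set String), s.Nodup →
      (l.foldl (fun s c => PySem.Set.update s (c.map Prod.fst)) s).Nodup by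
    exact h _ _ List.nodup_nil
  intro l
  induction l with
  | nil => intro s hs; exact hs
  | cons c t ih => intro s hs; exact ih _ (PySem.Set.nodup_update _ _ hs)

-- sorted with a (k1, name) composite key IS sorted under the lexicographic order
lemma sorted2_eq_sorted_lex (xs : List String) (k1 : String → Int) :
    PySem.List.sorted2 xs k1 (fun n => n) false
      = PySem.List.sorted xs (fun n => toLex (k1 n, n)) false := by
  rw [PySem.List.sorted_eq_foldl_insertBy]
  have hb : (fun a b : String => decide (k1 a < k1 b) || (!decide (k1 b < k1 a) && decide (a < b)))
      = (fun a b : String => decide (toLex (k1 a, a) < toLex (k1 b, b))) := by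
    funext a b
    by_cases h1 : k1 a < k1 b
    · simp [h1, Prod.Lex.lt_iff]
    · by_cases h2 : k1 b < k1 a
      · have : ¬ toLex (k1 a, a) < toLex (k1 b, b) := by
          simp [Prod.Lex.lt_iff]; omega
        simp [h1, h2, this]
      · have he : k1 a = k1 b := le_antisymm (not_lt.mp h2) (not_lt.mp h1)
        by_cases h3 : a < b
        · have : toLex (k1 a, a) < toLex (k1 b, b) := by
            rw [Prod.Lex.lt_iff]; exact Or.inr ⟨he, h3⟩
          simp [h1, h2, h3, this]
        · have : ¬ toLex (k1 a, a) < toLex (k1 b, b) := by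
            rw [Prod.Lex.lt_iff]; push Not; exact ⟨not_lt.mp h1, fun _ => not_lt.mp h3⟩
          simp [h1, h2, h3, this]
  show List.foldl
      (fun acc x => PySem.List.insertBy
        (fun a b => decide (k1 a < k1 b) || (!decide (k1 b < k1 a) && decide (a < b))) x acc) [] xs = _
  rw [hb]

-- A's result is a strictly pvKey-increasing rearrangement of the union set
lemma pvResult_perm (S : PySem.Set String) (hS : S.Nodup) :
    (pvPriority.filter (fun prop => PySem.Set.contains S prop) ++
      PySem.List.sorted (S.filter (fun prop => !(pvPriority.contains prop))) (fun x => x) false).Perm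
      S := by
  have h1 : (pvPriority.filter (fun prop => PySem.Set.contains S prop)).Perm
      (S.filter (fun prop => pvPriority.contains prop)) := by
    rw [List.perm_ext_iff_of_nodup (List.Nodup.filter _ (by decide)) (List.Nodup.filter _ hS)]
    intro a
    simp [List.mem_filter, PySem.Set.contains, and_comm]
  have h2 : (PySem.List.sorted (S.filter (fun prop => !(pvPriority.contains prop))) (fun x => x) false).Perm
      (S.filter (fun prop => !(pvPriority.contains prop))) := PySem.List.sorted_perm _ _ _
  exact (h1.append h2).trans (List.filter_append_perm _ S)

lemma pvResult_pairwise (S : PySem.Set String) (hS : S.Nodup) :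
    (pvPriority.filter (fun prop => PySem.Set.contains S prop) ++
      PySem.List.sorted (S.filter (fun prop => !(pvPriority.contains prop))) (fun x => x) false).Pairwise
      (fun a b => pvKey a < pvKey b) := by
  rw [List.pairwise_append]
  refine ⟨?_, ?_, ?_⟩
  · refine List.Pairwise.filter _ ?_
    simp only [pvPriority, List.pairwise_cons, List.mem_cons, List.not_mem_nil]
    refine ⟨?_, ?_, ?_, by simp⟩ <;>
      · intro b hb
        rcases hb with h | h | h | h <;> first
          | (subst h; rw [pvKey, pvKey, Prod.Lex.lt_iff]; left; simp only [ofLex_toLex]; decide)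
          | simp_all
  · have hnd : (PySem.List.sorted (S.filter (fun prop => !(pvPriority.contains prop))) (fun x => x) false).Nodup :=
      (PySem.List.sorted_perm _ _ _).nodup_iff.mpr (List.Nodup.filter _ hS)
    have hle := PySem.List.sorted_pairwise (S.filter (fun prop => !(pvPriority.contains prop))) (fun x : String => x)
    have := hle.and hnd
    refine this.imp_of_mem ?_
    intro a b ha hb hab
    have ha' : a ∉ pvPriority := by
      have := (PySem.List.mem_sorted _ _ _ _).mp ha
      simp only [List.mem_filter, Bool.not_eq_true'] at this
      simpa using this.2
    have hb' : b ∉ pvPriority := by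
      have := (PySem.List.mem_sorted _ _ _ _).mp hb
      simp only [List.mem_filter, Bool.not_eq_true'] at this
      simpa using this.2
    rw [pvKey, pvKey, Prod.Lex.lt_iff, pvRank_not_mem a ha', pvRank_not_mem b hb']
    simp only [ofLex_toLex]
    exact Or.inr ⟨by trivial, lt_of_le_of_ne hab.1 hab.2⟩
  · intro a ha b hb
    have ha' : a ∈ pvPriority := (List.mem_filter.mp ha).1
    have hb' : b ∉ pvPriority := by
      have := (PySem.List.mem_sorted _ _ _ _).mp hb
      simp only [List.mem_filter, Bool.not_eq_true'] at this
      simpa using this.2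
    rw [pvKey, pvKey, Prod.Lex.lt_iff, pvRank_not_mem b hb']
    left
    simp only [ofLex_toLex]
    fin_cases ha' <;> decide

-- ===== VERDICT (by name: the statement is the Claim_ definition above) =====
theorem get_all_properties_spec : Claim_equal_get_all_properties := by
  intro component_data_list _
  unfold Spec_get_all_properties get_all_properties get_all_properties_alt
  rw [pvRank_eq]
  have hlen : ((pvPriority.length : Int)) = 4 := by decide
  simp only [hlen]
  rw [sorted2_eq_sorted_lex]
  have hS := pvCollect_nodup component_data_list
  exact (PySem.List.sorted_eq_of_perm_of_pairwise_lt _ _ pvKey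
    (pvResult_perm _ hS) (pvResult_pairwise _ hS)).symm
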